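-- pv_equiv track=rewrite | github.com/TobiahRex/algorist | library_2022/graphs/graph_sandbox.py | scan_islands
-- ===== SOURCE A (Python) =====
-- def scan_islands(g):
--     all_island, no_island = True, True
--     for row in g:
--         island_count = sum(row)
--         if len(row) != island_count:
--             all_island = False
--         if island_count:
--             no_island = False
--         if all([not all_island, not no_island]):
--             break
--     return all_island, no_island
-- ===== SOURCE B (Python) =====
-- def scan_islands(g):
--     all_island = all(sum(row) == len(row) for row in g)
--     no_island = all(sum(row) == 0 for row in g)
--     return all_island, no_island
-- ===== Notes on version B (the rewrite author's own statement) =====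
-- stated objective: simpler
-- what changed: Replaces the single stateful early-exit loop with two independent short-circuiting all(...) reductions, one per flag, keeping the sum-based row test.
import Mathlib
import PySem

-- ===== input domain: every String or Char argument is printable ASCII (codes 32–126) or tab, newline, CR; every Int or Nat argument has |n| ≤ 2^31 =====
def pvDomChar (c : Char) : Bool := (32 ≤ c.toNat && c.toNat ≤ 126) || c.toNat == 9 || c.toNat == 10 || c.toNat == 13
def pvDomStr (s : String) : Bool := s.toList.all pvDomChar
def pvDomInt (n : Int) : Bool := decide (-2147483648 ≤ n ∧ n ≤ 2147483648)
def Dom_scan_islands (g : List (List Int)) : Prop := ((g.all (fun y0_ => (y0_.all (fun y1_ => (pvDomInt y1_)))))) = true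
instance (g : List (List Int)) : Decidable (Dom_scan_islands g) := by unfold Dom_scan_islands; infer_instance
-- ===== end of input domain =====

-- B computes the two flags as two independent short-circuiting all-reductions instead of A's single stateful early-exit loop.


-- ===== PORT A =====
-- the loop over rows, carrying (all_island, no_island) and breaking when both are false
def scanIslandsLoop : List (List Int) → Bool → Bool → Bool × Bool
  | [], allI, noI => (allI, noI)
  | row :: rest, allI, noI =>
    let islandCount : Int := row.sum
    let allI' := if (row.length : Int) ≠ islandCount then false else allI
    let noI' := if islandCount ≠ 0 then false else noI
    if !allI' && !noI' then (allI', noI') else scanIslandsLoop rest allI' noI'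

def scan_islands (g : List (List Int)) : Bool × Bool := scanIslandsLoop g true true

-- ===== PORT B =====
def scan_islands_alt (g : List (List Int)) : Bool × Bool :=
  (g.all (fun row => row.sum == (row.length : Int)), g.all (fun row => row.sum == 0))

-- ===== PRECONDITION & SPEC =====
def Spec_scan_islands (g : List (List Int)) (out : Bool × Bool) : Prop := out = scan_islands_alt g
instance (g : List (List Int)) (out : Bool × Bool) : Decidable (Spec_scan_islands g out) := by unfold Spec_scan_islands; infer_instance

-- ===== CLAIM (what is proved, stated in full; the proofs are below) =====
def Claim_equal_scan_islands : Prop := ∀ (g : List (List Int)), Dom_scan_islands g → Spec_scan_islands g (scan_islands g)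

-- ===== LEMMAS AND PROOFS =====
-- loop invariant: the loop ANDs each starting flag with the corresponding all-reduction over the remaining rows
theorem scanIslandsLoop_eq (g : List (List Int)) (a n : Bool) :
    scanIslandsLoop g a n =
      (a && g.all (fun row => row.sum == (row.length : Int)), n && g.all (fun row => row.sum == 0)) := by
  induction g generalizing a n with
  | nil => simp [scanIslandsLoop]
  | cons row rest ih =>
    cases a <;> cases n <;>
      by_cases h1 : (row.length : Int) = row.sum <;>
      by_cases h2 : row.sum = (0 : Int) <;>
      first
      | (simp [scanIslandsLoop, h1, h2, ih]; done)
      | (have h1s : ¬ row.sum = (row.length : Int) := fun h => h1 h.symm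
         simp [scanIslandsLoop, h1, h2, h1s, ih]; done)
      | (have h0 : ¬ (0 : Int) = (row.length : Int) := fun h => h1 (h.symm.trans h2.symm)
         have hne : ¬ row = [] := fun h => h0 (by simp [h])
         simp [scanIslandsLoop, h1, h2, h0, hne, ih]; done)

-- ===== VERDICT (by name: the statement is the Claim_ definition above) =====
theorem scan_islands_spec : Claim_equal_scan_islands := by
  intro g _
  unfold Spec_scan_islands scan_islands scan_islands_alt
  rw [scanIslandsLoop_eq]
  simp
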